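-- pv_equiv track=rewrite | github.com/EricDing618/Equation | base.py | big_parenthesis
-- ===== SOURCE A (Python) =====
-- def big_parenthesis(e:str):
--     c1=e.split('{')
--     c2:list=[]
--     for i in range(len(c1)):
--         c3=c1[i].split("}")
--         for j in range(len(c3)):
--             c2.append(c3[j])
--     return c2
-- ===== SOURCE B (Python) =====
-- def big_parenthesis(e: str):
--     out = []
--     buf = []
--     for ch in e:
--         if ch == '{' or ch == '}':
--             out.append(''.join(buf))
--             buf = []
--         else:
--             buf.append(ch)
--     out.append(''.join(buf))
--     return out
-- ===== Notes on version B (the rewrite author's own statement) =====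
-- stated objective: simpler
-- what changed: Replaces the two nested split passes (split on '{', then split every piece on '}') by one linear scan over the characters that flushes a token buffer at every brace.
import Mathlib
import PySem

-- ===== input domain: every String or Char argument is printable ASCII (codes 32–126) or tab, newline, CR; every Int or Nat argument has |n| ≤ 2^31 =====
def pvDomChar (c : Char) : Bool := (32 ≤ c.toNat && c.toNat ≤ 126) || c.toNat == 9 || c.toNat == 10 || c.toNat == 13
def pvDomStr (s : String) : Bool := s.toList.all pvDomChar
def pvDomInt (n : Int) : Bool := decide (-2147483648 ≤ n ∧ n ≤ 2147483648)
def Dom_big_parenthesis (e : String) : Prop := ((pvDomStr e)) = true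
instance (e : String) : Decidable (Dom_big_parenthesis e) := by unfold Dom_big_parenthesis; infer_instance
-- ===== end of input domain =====

-- B replaces A's two nested split passes by a single linear scan with a token buffer (same cost; simpler).


-- ===== PORT A =====
-- c1 = e.split('{'); for i in range(len(c1)): c3 = c1[i].split('}'); for j in range(len(c3)): c2.append(c3[j])
def big_parenthesis (e : String) : List String :=
  let c1 : List String := (PySem.Chars.splitOn e.toList ['{']).map String.ofList
  let c2 : List String := []
  (PySem.List.pyRange 0 (PySem.List.len c1)).foldl (fun c2 i =>
    let c3 : List String :=
      (PySem.Chars.splitOn (PySem.List.pyGetD c1 i "").toList ['}']).map String.ofList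
    (PySem.List.pyRange 0 (PySem.List.len c3)).foldl (fun c2 j =>
      c2 ++ [PySem.List.pyGetD c3 j ""]) c2) c2

-- ===== PORT B =====
-- one pass: flush the buffer at every '{' or '}', and once more at the end
def pvAltGo : List Char → List Char → List String
  | [], buf => [String.ofList buf]
  | c :: cs, buf =>
      if c = '{' ∨ c = '}' then String.ofList buf :: pvAltGo cs []
      else pvAltGo cs (buf ++ [c])

def big_parenthesis_alt (e : String) : List String := pvAltGo e.toList []

-- ===== PRECONDITION & SPEC =====
def Spec_big_parenthesis (e : String) (out : List String) : Prop := out = big_parenthesis_alt e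
instance (e : String) (out : List String) : Decidable (Spec_big_parenthesis e out) := by unfold Spec_big_parenthesis; infer_instance

-- ===== CLAIM (what is proved, stated in full; the proofs are below) =====
def Claim_equal_big_parenthesis : Prop := ∀ (e : String), Dom_big_parenthesis e → Spec_big_parenthesis e (big_parenthesis e)

-- ===== LEMMAS AND PROOFS =====

/-- Natural single-separator split (reference model for `Chars.splitOn` with a one-char sep). -/
def pvSplit (c : Char) : List Char → List (List Char)
  | [] => [[]]
  | x :: xs => if x = c then [] :: pvSplit c xs else (pvSplit c xs).modifyHead (x :: ·)

/-- Split on both braces at once (reference model for B's scan). -/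
def pvSplit2 : List Char → List (List Char)
  | [] => [[]]
  | x :: xs => if x = '{' ∨ x = '}' then [] :: pvSplit2 xs else (pvSplit2 xs).modifyHead (x :: ·)

theorem pvSplit_ne_nil (c : Char) (l : List Char) : pvSplit c l ≠ [] := by
  induction l with
  | nil => simp [pvSplit]
  | cons x xs ih =>
      simp only [pvSplit]
      split_ifs
      · simp
      · cases h : pvSplit c xs with
        | nil => exact absurd h ih
        | cons hd tl => simp [List.modifyHead]

theorem pvSplit2_ne_nil (l : List Char) : pvSplit2 l ≠ [] := by
  induction l with
  | nil => simp [pvSplit2]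
  | cons x xs ih =>
      simp only [pvSplit2]
      split_ifs
      · simp
      · cases h : pvSplit2 xs with
        | nil => exact absurd h ih
        | cons hd tl => simp [List.modifyHead]

theorem pv_go_eq (c : Char) (fuel : Nat) :
    ∀ (l cur : List Char) (acc : List (List Char)), l.length ≤ fuel →
      PySem.Chars.splitOn.go [c] fuel l cur acc
        = acc.reverse ++ (pvSplit c l).modifyHead (cur.reverse ++ ·) := by
  induction fuel with
  | zero =>
      intro l cur acc h
      have hl : l = [] := List.length_eq_zero_iff.mp (Nat.le_zero.mp h)
      subst hl
      simp [PySem.Chars.splitOn.go, pvSplit, List.modifyHead]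
  | succ fuel ih =>
      intro l cur acc h
      cases l with
      | nil => simp [PySem.Chars.splitOn.go, pvSplit, List.modifyHead]
      | cons x rest =>
          simp only [PySem.Chars.splitOn.go]
          by_cases hx : x = c
          · have hpre : List.isPrefixOf [c] (x :: rest) = true := by
              simp [List.isPrefixOf, hx]
            rw [if_pos hpre]
            have hrest : rest.length ≤ fuel := by
              simpa using Nat.succ_le_succ_iff.mp h
            rw [ih (List.drop (List.length [c]) (x :: rest)) [] (cur.reverse :: acc)
              (by simpa using hrest)]
            cases hr : pvSplit c rest with
            | nil => exact absurd hr (pvSplit_ne_nil c rest)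
            | cons hd tl => simp [pvSplit, hx, List.modifyHead, hr]
          · have hpre : List.isPrefixOf [c] (x :: rest) = false := by
              simp [List.isPrefixOf]
              exact fun hc => absurd hc.symm hx
            rw [if_neg (by simp [hpre])]
            have hrest : rest.length ≤ fuel := Nat.succ_le_succ_iff.mp (by simpa using h)
            rw [ih rest (x :: cur) acc hrest]
            obtain ⟨hd, tl, hsp⟩ := List.exists_cons_of_ne_nil (pvSplit_ne_nil c rest)
            simp [pvSplit, hx, hsp, List.modifyHead]

theorem pv_splitOn_single (c : Char) (s : List Char) :
    PySem.Chars.splitOn s [c] = pvSplit c s := by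
  show PySem.Chars.splitOn.go [c] (s.length + 1) s [] [] = _
  rw [pv_go_eq c (s.length + 1) s [] [] (by omega)]
  cases h : pvSplit c s <;> simp [List.modifyHead]

theorem pv_flatMap_split (cs : List Char) :
    (pvSplit '{' cs).flatMap (pvSplit '}') = pvSplit2 cs := by
  induction cs with
  | nil => simp [pvSplit, pvSplit2]
  | cons x xs ih =>
      by_cases hx : x = '{'
      · simp [pvSplit, pvSplit2, hx, ih]
      · obtain ⟨hd, tl, hsp⟩ := List.exists_cons_of_ne_nil (pvSplit_ne_nil '{' xs)
        by_cases hx2 : x = '}'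
        · have : pvSplit2 (x :: xs) = [] :: pvSplit2 xs := by
            simp [pvSplit2, hx2]
          rw [this, ← ih]
          simp [pvSplit, hsp, List.modifyHead, hx2]
        · obtain ⟨hd2, tl2, hsp2⟩ := List.exists_cons_of_ne_nil (pvSplit_ne_nil '}' hd)
          have h2 : pvSplit2 (x :: xs) = (pvSplit2 xs).modifyHead (x :: ·) := by
            simp [pvSplit2, hx, hx2]
          rw [h2, ← ih]
          simp [pvSplit, hx, hsp, hsp2, List.modifyHead, hx2]

theorem pv_altGo_eq (cs : List Char) :
    ∀ buf, pvAltGo cs buf = ((pvSplit2 cs).modifyHead (buf ++ ·)).map String.ofList := by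
  induction cs with
  | nil => intro buf; simp [pvAltGo, pvSplit2, List.modifyHead]
  | cons x xs ih =>
      intro buf
      by_cases hx : x = '{' ∨ x = '}'
      · obtain ⟨hd, tl, hsp⟩ := List.exists_cons_of_ne_nil (pvSplit2_ne_nil xs)
        simp [pvAltGo, pvSplit2, hx, ih, hsp, List.modifyHead]
      · obtain ⟨hd, tl, hsp⟩ := List.exists_cons_of_ne_nil (pvSplit2_ne_nil xs)
        simp [pvAltGo, pvSplit2, hx, ih, hsp, List.modifyHead]

theorem pv_inner_eq (c3 : List String) (c2 : List String) :
    (PySem.List.pyRange 0 (PySem.List.len c3)).foldl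
      (fun c2 j => c2 ++ [PySem.List.pyGetD c3 j ""]) c2 = c2 ++ c3 := by
  have h := PySem.List.foldl_pyRange_pyGetD c3 "" (fun acc s => acc ++ [s]) c2
      (a := 0) (by norm_num)
  simp only [Int.toNat_zero, List.drop_zero, PySem.List.foldl_append_singleton] at h
  exact h

theorem pv_A_eq (e : String) :
    big_parenthesis e =
      ((pvSplit '{' e.toList).flatMap (pvSplit '}')).map String.ofList := by
  show (PySem.List.pyRange 0 (PySem.List.len ((PySem.Chars.splitOn e.toList ['{']).map String.ofList))).foldl _ _ = _
  simp only [pv_inner_eq]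
  rw [PySem.List.foldl_pyRange_pyGetD ((PySem.Chars.splitOn e.toList ['{']).map String.ofList) ""
      (fun acc p => acc ++ (PySem.Chars.splitOn p.toList ['}']).map String.ofList) []
      (a := 0) (by norm_num)]
  rw [PySem.List.foldl_append_eq_flatMap]
  simp [pv_splitOn_single, List.flatMap_map, List.map_flatMap]

-- ===== VERDICT (by name: the statement is the Claim_ definition above) =====
theorem big_parenthesis_spec : Claim_equal_big_parenthesis := by
  intro e _
  show big_parenthesis e = big_parenthesis_alt e
  rw [pv_A_eq, big_parenthesis_alt, pv_altGo_eq, pv_flatMap_split]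
  cases h : pvSplit2 e.toList <;> simp [List.modifyHead]
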